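-- pv_equiv track=rewrite | github.com/JuliMart/apt-totem-full | apt-totem-backend/services/ai/yolo_clothing_detector.py | _determine_style
-- ===== SOURCE A (Python) =====
-- from typing import Dict, List, Any, Optional
--
-- def _determine_style(clothing_items: List[Dict]) -> str:
--     """
--     Determina el estilo basado en las prendas detectadas
--     Incluye análisis de accesorios de cabeza
--     """
--     items = [item["item"] for item in clothing_items]
--
--     # Análisis de accesorios de cabeza
--     head_accessories = [item for item in items if item in ["gorra_deportiva", "jockey", "sombrero", "gorro", "gafas_sol"]]
--
--     # Estilo deportivo (gorras deportivas, jockeys)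
--     if "gorra_deportiva" in items or "jockey" in items:
--         return "deportivo"
--
--     # Estilo elegante (sombreros, gafas de sol)
--     elif "sombrero" in items or "gafas_sol" in items:
--         return "elegante"
--
--     # Estilo casual (gorros)
--     elif "gorro" in items:
--         return "casual"
--
--     # Análisis de prendas corporales
--     elif "chaqueta" in items or "traje" in items:
--         return "formal"
--     elif "pantalones_cortos" in items:
--         return "deportivo"
--     elif "vestido" in items:
--         return "elegante"
--     else:
--         return "casual"
-- ===== SOURCE B (Python) =====
-- from typing import Dict, List, Any, Optional
--
-- # Each trigger item mapped to the priority rank of the rule it fires (lower = higher priority).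
-- _PRIORITY = {
--     "gorra_deportiva": 0, "jockey": 0,
--     "sombrero": 1, "gafas_sol": 1,
--     "gorro": 2,
--     "chaqueta": 3, "traje": 3,
--     "pantalones_cortos": 4, "vestido": 5,
-- }
-- # Label of the best (minimal) rank; rank 6 = nothing matched -> default "casual".
-- _LABELS = ["deportivo", "elegante", "casual", "formal", "deportivo", "elegante", "casual"]
--
-- def _determine_style(clothing_items: List[Dict]) -> str:
--     best = 6
--     for det in clothing_items:
--         best = min(best, _PRIORITY.get(det["item"], 6))
--     return _LABELS[best]
-- ===== Notes on version B (the rewrite author's own statement) =====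
-- stated objective: alternative
-- what changed: Instead of A's dead head_accessories pass plus a six-way if/elif chain of repeated list membership scans, B does a single fold: each item is mapped through a priority dict to a numeric rank, the minimum rank is accumulated in one pass, and the answer is a table lookup of that minimum.
import Mathlib
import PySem

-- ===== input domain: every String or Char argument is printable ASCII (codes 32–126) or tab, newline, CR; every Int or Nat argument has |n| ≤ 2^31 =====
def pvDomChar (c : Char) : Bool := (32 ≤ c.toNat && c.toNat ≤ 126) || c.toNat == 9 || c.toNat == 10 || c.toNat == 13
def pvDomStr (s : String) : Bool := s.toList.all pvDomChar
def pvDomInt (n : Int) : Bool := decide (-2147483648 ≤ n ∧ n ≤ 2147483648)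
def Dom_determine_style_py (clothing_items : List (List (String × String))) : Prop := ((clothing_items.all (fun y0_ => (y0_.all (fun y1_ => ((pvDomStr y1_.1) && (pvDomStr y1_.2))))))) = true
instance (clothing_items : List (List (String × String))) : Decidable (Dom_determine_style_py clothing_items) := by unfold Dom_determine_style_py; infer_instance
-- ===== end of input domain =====

-- B replaces A's dead head_accessories pass and six-way if/elif chain of list scans by a single
-- fold accumulating the minimum priority rank of the items (rank via a dict), then one table lookup.

-- ===== PORT A =====
def determine_style_py (clothing_items : List (List (String × String))) : String :=
  let items := clothing_items.map (fun d => PySem.Dict.getD (PySem.Dict.mk d) "item" "")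
  let _head_accessories := items.filter (fun i =>
    (["gorra_deportiva", "jockey", "sombrero", "gorro", "gafas_sol"] : List String).contains i)
  if items.contains "gorra_deportiva" || items.contains "jockey" then "deportivo"
  else if items.contains "sombrero" || items.contains "gafas_sol" then "elegante"
  else if items.contains "gorro" then "casual"
  else if items.contains "chaqueta" || items.contains "traje" then "formal"
  else if items.contains "pantalones_cortos" then "deportivo"
  else if items.contains "vestido" then "elegante"
  else "casual"

-- ===== PORT B =====
def dsPriority : PySem.Dict String Nat :=
  PySem.Dict.mk
    [ ("gorra_deportiva", 0), ("jockey", 0),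
      ("sombrero", 1), ("gafas_sol", 1),
      ("gorro", 2),
      ("chaqueta", 3), ("traje", 3),
      ("pantalones_cortos", 4), ("vestido", 5) ]

def dsLabels : List String :=
  ["deportivo", "elegante", "casual", "formal", "deportivo", "elegante", "casual"]

def determine_style_py_alt (clothing_items : List (List (String × String))) : String :=
  let best := clothing_items.foldl
    (fun b det => min b (PySem.Dict.getD dsPriority (PySem.Dict.getD (PySem.Dict.mk det) "item" "") 6)) 6
  -- _LABELS[best]: best ≤ 6 always holds, so the index is in range and the getD default is unreachable
  dsLabels.getD best ""

-- ===== PRECONDITION & SPEC =====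
-- Pre_ excludes inputs where some detection dict lacks the "item" key: Python A raises KeyError there.
def Pre_determine_style_py (clothing_items : List (List (String × String))) : Prop :=
  ∀ d ∈ clothing_items, "item" ∈ d.map Prod.fst
instance (clothing_items : List (List (String × String))) : Decidable (Pre_determine_style_py clothing_items) := by unfold Pre_determine_style_py; infer_instance

def pvWitness_determine_style_py : (List (List (String × String))) :=
  [[("item", "gorro")], [("item", "vestido"), ("conf", "0.9")]]

def Spec_determine_style_py (clothing_items : List (List (String × String))) (out : String) : Prop := out = determine_style_py_alt clothing_items
instance (clothing_items : List (List (String × String))) (out : String) : Decidable (Spec_determine_style_py clothing_items out) := by unfold Spec_determine_style_py; infer_instance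

-- ===== CLAIM (what is proved, stated in full; the proofs are below) =====
def Claim_equal_determine_style_py : Prop := ∀ (clothing_items : List (List (String × String))), Dom_determine_style_py clothing_items → Pre_determine_style_py clothing_items → Spec_determine_style_py clothing_items (determine_style_py clothing_items)

-- ===== LEMMAS AND PROOFS =====

-- the rank an item name gets from B's priority dict
def dsRank (s : String) : Nat := PySem.Dict.getD dsPriority s 6

theorem dsRank_cases (s : String) :
    dsRank s =
      if s = "gorra_deportiva" then 0 else if s = "jockey" then 0
      else if s = "sombrero" then 1 else if s = "gafas_sol" then 1
      else if s = "gorro" then 2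
      else if s = "chaqueta" then 3 else if s = "traje" then 3
      else if s = "pantalones_cortos" then 4 else if s = "vestido" then 5 else 6 := by
  split_ifs with h1 h2 h3 h4 h5 h6 h7 h8 h9
  · subst h1; rfl
  · subst h2; rfl
  · subst h3; rfl
  · subst h4; rfl
  · subst h5; rfl
  · subst h6; rfl
  · subst h7; rfl
  · subst h8; rfl
  · subst h9; rfl
  · simp only [dsRank, dsPriority, PySem.Dict.getD, PySem.Dict.get?_mk_cons, beq_iff_eq]
    rw [if_neg (fun h => h1 h.symm), if_neg (fun h => h2 h.symm), if_neg (fun h => h3 h.symm),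
      if_neg (fun h => h4 h.symm), if_neg (fun h => h5 h.symm), if_neg (fun h => h6 h.symm),
      if_neg (fun h => h7 h.symm), if_neg (fun h => h8 h.symm), if_neg (fun h => h9 h.symm)]
    rfl

-- B's fold is the min of the ranks: characterised by ≤
theorem foldl_min_le_iff (l : List String) (b k : Nat) :
    (l.foldl (fun a s => min a (dsRank s)) b ≤ k) ↔ (b ≤ k ∨ ∃ x ∈ l, dsRank x ≤ k) := by
  induction l generalizing b with
  | nil => simp
  | cons x l ih =>
    simp only [List.foldl_cons, ih, min_le_iff, List.mem_cons]
    constructor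
    · rintro (((h | h) | ⟨y, hy, hr⟩))
      · exact Or.inl h
      · exact Or.inr ⟨x, Or.inl rfl, h⟩
      · exact Or.inr ⟨y, Or.inr hy, hr⟩
    · rintro (h | ⟨y, (rfl | hy), hr⟩)
      · exact Or.inl (Or.inl h)
      · exact Or.inl (Or.inr hr)
      · exact Or.inr ⟨y, hy, hr⟩

-- which rule ranks are reachable below k, in terms of membership of the trigger names
theorem rank_le_iff (items : List String) (k : Nat) :
    (∃ x ∈ items, dsRank x ≤ k) ↔
      (("gorra_deportiva" ∈ items ∨ "jockey" ∈ items) ∨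
       (k ≥ 1 ∧ ("sombrero" ∈ items ∨ "gafas_sol" ∈ items)) ∨
       (k ≥ 2 ∧ "gorro" ∈ items) ∨
       (k ≥ 3 ∧ ("chaqueta" ∈ items ∨ "traje" ∈ items)) ∨
       (k ≥ 4 ∧ "pantalones_cortos" ∈ items) ∨
       (k ≥ 5 ∧ "vestido" ∈ items) ∨
       (k ≥ 6 ∧ items ≠ [])) := by
  constructor
  · rintro ⟨x, hx, hr⟩
    rw [dsRank_cases] at hr
    split_ifs at hr with h1 h2 h3 h4 h5 h6 h7 h8 h9
    · exact Or.inl (Or.inl (h1 ▸ hx))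
    · exact Or.inl (Or.inr (h2 ▸ hx))
    · exact Or.inr (Or.inl ⟨hr, Or.inl (h3 ▸ hx)⟩)
    · exact Or.inr (Or.inl ⟨hr, Or.inr (h4 ▸ hx)⟩)
    · exact Or.inr (Or.inr (Or.inl ⟨hr, h5 ▸ hx⟩))
    · exact Or.inr (Or.inr (Or.inr (Or.inl ⟨hr, Or.inl (h6 ▸ hx)⟩)))
    · exact Or.inr (Or.inr (Or.inr (Or.inl ⟨hr, Or.inr (h7 ▸ hx)⟩)))
    · exact Or.inr (Or.inr (Or.inr (Or.inr (Or.inl ⟨hr, h8 ▸ hx⟩))))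
    · exact Or.inr (Or.inr (Or.inr (Or.inr (Or.inr (Or.inl ⟨hr, h9 ▸ hx⟩)))))
    · exact Or.inr (Or.inr (Or.inr (Or.inr (Or.inr (Or.inr ⟨hr, List.ne_nil_of_mem hx⟩)))))
  · rintro ((hx | hx) | ⟨hk, (hx | hx)⟩ | ⟨hk, hx⟩ | ⟨hk, (hx | hx)⟩ | ⟨hk, hx⟩ | ⟨hk, hx⟩ | ⟨hk, hne⟩)
    · exact ⟨_, hx, by rw [dsRank_cases]; simp⟩
    · exact ⟨_, hx, by rw [dsRank_cases]; simp⟩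
    · exact ⟨_, hx, by rw [dsRank_cases]; simp; omega⟩
    · exact ⟨_, hx, by rw [dsRank_cases]; simp; omega⟩
    · exact ⟨_, hx, by rw [dsRank_cases]; simp; omega⟩
    · exact ⟨_, hx, by rw [dsRank_cases]; simp; omega⟩
    · exact ⟨_, hx, by rw [dsRank_cases]; simp; omega⟩
    · exact ⟨_, hx, by rw [dsRank_cases]; simp; omega⟩
    · exact ⟨_, hx, by rw [dsRank_cases]; simp; omega⟩
    · obtain ⟨x, hx⟩ := List.exists_mem_of_ne_nil _ hne
      exact ⟨x, hx, by rw [dsRank_cases]; split_ifs <;> omega⟩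

-- ===== VERDICT (by name: the statement is the Claim_ definition above) =====
theorem determine_style_py_spec : Claim_equal_determine_style_py := by
  intro ci _ _
  unfold Spec_determine_style_py determine_style_py determine_style_py_alt
  simp only []
  set items := ci.map (fun d => PySem.Dict.getD (PySem.Dict.mk d) "item" "") with hitems
  have hfold : (ci.foldl
      (fun b det => min b (PySem.Dict.getD dsPriority (PySem.Dict.getD (PySem.Dict.mk det) "item" "") 6)) 6)
      = items.foldl (fun a s => min a (dsRank s)) 6 := by
    rw [hitems, List.foldl_map]; rfl
  rw [hfold]
  set best := items.foldl (fun a s => min a (dsRank s)) 6 with hbest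
  have hle : forall k, best ≤ k ↔ (6 ≤ k ∨ ∃ x ∈ items, dsRank x ≤ k) := fun k =>
    foldl_min_le_iff items 6 k
  have h6 : best ≤ 6 := (hle 6).2 (Or.inl le_rfl)
  by_cases h0 : ("gorra_deportiva" ∈ items ∨ "jockey" ∈ items)
  · have hbj : best ≤ 0 := (hle 0).2 (Or.inr ((rank_le_iff items 0).2 (Or.inl h0)))
    have hb : best = 0 := by omega
    simp [List.contains_eq_mem, h0, hb, dsLabels]
  have hg0 : ¬ best ≤ 0 := by
    intro hlek
    rcases (hle 0).1 hlek with h6x | hex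
    · omega
    · rcases (rank_le_iff items 0).1 hex with hc|⟨hk,hc⟩|⟨hk,hc⟩|⟨hk,hc⟩|⟨hk,hc⟩|⟨hk,hc⟩|⟨hk,hc⟩
      · exact h0 hc
      · omega
      · omega
      · omega
      · omega
      · omega
      · omega
  by_cases h1 : ("sombrero" ∈ items ∨ "gafas_sol" ∈ items)
  · have hbj : best ≤ 1 := (hle 1).2 (Or.inr ((rank_le_iff items 1).2 (Or.inr (Or.inl ⟨by omega, h1⟩))))
    have hb : best = 1 := by omega
    simp [List.contains_eq_mem, h0, h1, hb, dsLabels]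
  have hg1 : ¬ best ≤ 1 := by
    intro hlek
    rcases (hle 1).1 hlek with h6x | hex
    · omega
    · rcases (rank_le_iff items 1).1 hex with hc|⟨hk,hc⟩|⟨hk,hc⟩|⟨hk,hc⟩|⟨hk,hc⟩|⟨hk,hc⟩|⟨hk,hc⟩
      · exact h0 hc
      · exact h1 hc
      · omega
      · omega
      · omega
      · omega
      · omega
  by_cases h2 : ("gorro" ∈ items)
  · have hbj : best ≤ 2 := (hle 2).2 (Or.inr ((rank_le_iff items 2).2 (Or.inr (Or.inr (Or.inl ⟨by omega, h2⟩)))))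
    have hb : best = 2 := by omega
    simp [List.contains_eq_mem, h0, h1, h2, hb, dsLabels]
  have hg2 : ¬ best ≤ 2 := by
    intro hlek
    rcases (hle 2).1 hlek with h6x | hex
    · omega
    · rcases (rank_le_iff items 2).1 hex with hc|⟨hk,hc⟩|⟨hk,hc⟩|⟨hk,hc⟩|⟨hk,hc⟩|⟨hk,hc⟩|⟨hk,hc⟩
      · exact h0 hc
      · exact h1 hc
      · exact h2 hc
      · omega
      · omega
      · omega
      · omega
  by_cases h3 : ("chaqueta" ∈ items ∨ "traje" ∈ items)
  · have hbj : best ≤ 3 := (hle 3).2 (Or.inr ((rank_le_iff items 3).2 (Or.inr (Or.inr (Or.inr (Or.inl ⟨by omega, h3⟩))))))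
    have hb : best = 3 := by omega
    simp [List.contains_eq_mem, h0, h1, h2, h3, hb, dsLabels]
  have hg3 : ¬ best ≤ 3 := by
    intro hlek
    rcases (hle 3).1 hlek with h6x | hex
    · omega
    · rcases (rank_le_iff items 3).1 hex with hc|⟨hk,hc⟩|⟨hk,hc⟩|⟨hk,hc⟩|⟨hk,hc⟩|⟨hk,hc⟩|⟨hk,hc⟩
      · exact h0 hc
      · exact h1 hc
      · exact h2 hc
      · exact h3 hc
      · omega
      · omega
      · omega
  by_cases h4 : ("pantalones_cortos" ∈ items)
  · have hbj : best ≤ 4 := (hle 4).2 (Or.inr ((rank_le_iff items 4).2 (Or.inr (Or.inr (Or.inr (Or.inr (Or.inl ⟨by omega, h4⟩)))))))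
    have hb : best = 4 := by omega
    simp [List.contains_eq_mem, h0, h1, h2, h3, h4, hb, dsLabels]
  have hg4 : ¬ best ≤ 4 := by
    intro hlek
    rcases (hle 4).1 hlek with h6x | hex
    · omega
    · rcases (rank_le_iff items 4).1 hex with hc|⟨hk,hc⟩|⟨hk,hc⟩|⟨hk,hc⟩|⟨hk,hc⟩|⟨hk,hc⟩|⟨hk,hc⟩
      · exact h0 hc
      · exact h1 hc
      · exact h2 hc
      · exact h3 hc
      · exact h4 hc
      · omega
      · omega
  by_cases h5 : ("vestido" ∈ items)
  · have hbj : best ≤ 5 := (hle 5).2 (Or.inr ((rank_le_iff items 5).2 (Or.inr (Or.inr (Or.inr (Or.inr (Or.inr (Or.inl ⟨by omega, h5⟩))))))))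
    have hb : best = 5 := by omega
    simp [List.contains_eq_mem, h0, h1, h2, h3, h4, h5, hb, dsLabels]
  have hg5 : ¬ best ≤ 5 := by
    intro hlek
    rcases (hle 5).1 hlek with h6x | hex
    · omega
    · rcases (rank_le_iff items 5).1 hex with hc|⟨hk,hc⟩|⟨hk,hc⟩|⟨hk,hc⟩|⟨hk,hc⟩|⟨hk,hc⟩|⟨hk,hc⟩
      · exact h0 hc
      · exact h1 hc
      · exact h2 hc
      · exact h3 hc
      · exact h4 hc
      · exact h5 hc
      · omega
  have hb : best = 6 := by omega
  simp [List.contains_eq_mem, h0, h1, h2, h3, h4, h5, hb, dsLabels]
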